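-- pv_equiv track=rewrite | github.com/aviswerdlow/k4 | 03_SOLVERS/zone_mask_v1/scripts/mask_library.py | apply
-- ===== SOURCE A (Python) =====
-- from typing import List, Dict, Any, Tuple
--
-- def apply(text: str, params: Dict[str, Any]) -> str:
--     n = params.get('n', 3)
--     block_size = params.get('block_size', 10)
--
--     result = []
--     for block_idx in range(0, len(text), block_size):
--         block = text[block_idx:block_idx + block_size]
--         offset = (block_idx // block_size) % n
--
--         for i in range(offset, len(block), n):
--             result.append(block[i])
--         for i in range(len(block)):
--             if i % n != offset:
--                 result.append(block[i])
--
--     return ''.join(result)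
-- ===== SOURCE B (Python) =====
-- def apply(text, params):
--     n = params.get('n', 3)
--     block_size = params.get('block_size', 10)
--     L = len(text)
--
--     def key(i):
--         b = i // block_size
--         offset = b % n
--         rank = 0 if (i % block_size) % n == offset else 1
--         return (2 * b + rank) * L + i
--
--     return ''.join(text[i] for i in sorted(range(L), key=key))
-- ===== Notes on version B (the rewrite author's own statement) =====
-- stated objective: alternative
-- what changed: A walks each block twice (a stride pass collecting indices congruent to the offset, then a filter pass for the rest); B instead assigns every global character position a single integer sort key (2*block + rank)*len + i and produces the output as one stable sort of all positions, with no per-block partition passes.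
-- outside the precondition, e.g. on apply('abc', {'n': -2}): A returns 'b', B returns 'acb'; on apply('abc', {'block_size': -1}): A returns '', B returns 'cba'
import Mathlib
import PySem

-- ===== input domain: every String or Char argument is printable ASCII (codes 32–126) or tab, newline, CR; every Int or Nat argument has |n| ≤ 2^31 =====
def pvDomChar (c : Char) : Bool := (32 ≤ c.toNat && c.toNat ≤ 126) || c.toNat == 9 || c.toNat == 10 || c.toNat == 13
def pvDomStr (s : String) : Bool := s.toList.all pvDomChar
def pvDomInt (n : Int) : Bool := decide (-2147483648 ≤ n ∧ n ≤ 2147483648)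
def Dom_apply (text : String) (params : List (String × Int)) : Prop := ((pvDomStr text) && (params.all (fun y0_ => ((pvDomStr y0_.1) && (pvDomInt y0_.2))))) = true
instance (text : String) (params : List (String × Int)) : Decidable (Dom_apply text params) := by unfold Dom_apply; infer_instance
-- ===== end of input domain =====

-- B replaces A's two explicit partition passes per block by one global stable sort of
-- all character positions under an integer key (2*block + rank)*len + i; alternative
-- decomposition, same return value for n ≥ 1 and block_size ≥ 1.


-- ===== PORT A =====
def apply (text : String) (params : List (String × Int)) : String :=
  let n := PySem.Dict.getD (PySem.Dict.mk params) "n" 3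
  let block_size := PySem.Dict.getD (PySem.Dict.mk params) "block_size" 10
  let t := text.toList
  let result : List Char :=
    (PySem.List.pyRange 0 (PySem.Str.len text) block_size).foldl
      (fun result block_idx =>
        let block := PySem.List.slice t (some block_idx) (some (block_idx + block_size))
        let offset := PySem.Int.mod (PySem.Int.floordiv block_idx block_size) n
        let result :=
          (PySem.List.pyRange offset (block.length : Int) n).foldl
            (fun r i => r ++ [PySem.List.pyGetD block i ' ']) result
        (PySem.List.pyRange 0 (block.length : Int) 1).foldl
          (fun r i => if PySem.Int.mod i n ≠ offset then r ++ [PySem.List.pyGetD block i ' '] else r)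
          result)
      []
  String.ofList result

-- ===== PORT B =====
-- the inner 'def key(i)' of Source B, lifted to a top-level helper
def applyAltKey (n block_size L i : Int) : Int :=
  let b := PySem.Int.floordiv i block_size
  let offset := PySem.Int.mod b n
  let rank : Int := if PySem.Int.mod (PySem.Int.mod i block_size) n = offset then 0 else 1
  (2 * b + rank) * L + i

def apply_alt (text : String) (params : List (String × Int)) : String :=
  let n := PySem.Dict.getD (PySem.Dict.mk params) "n" 3
  let block_size := PySem.Dict.getD (PySem.Dict.mk params) "block_size" 10
  let t := text.toList
  let L := PySem.Str.len text
  String.ofList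
    ((PySem.List.sorted (PySem.List.pyRange 0 L 1) (applyAltKey n block_size L)).map
      (fun i => PySem.List.pyGetD t i ' '))

-- ===== PRECONDITION & SPEC =====
-- Pre_ excludes n ≤ 0 and block_size ≤ 0: with n = 0 or block_size = 0 A raises
-- (ZeroDivisionError / ValueError); with a negative n or block_size A's first range is
-- empty so characters are silently dropped — an accident of range() on negative steps
-- that no caller of a reordering mask wants, while B keeps every character.
def Pre_apply (text : String) (params : List (String × Int)) : Prop :=
  1 ≤ PySem.Dict.getD (PySem.Dict.mk params) "n" 3 ∧
  1 ≤ PySem.Dict.getD (PySem.Dict.mk params) "block_size" 10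
instance (text : String) (params : List (String × Int)) : Decidable (Pre_apply text params) := by
  unfold Pre_apply; infer_instance

def pvWitness_apply : String × (List (String × Int)) :=
  ("hello world!", [("n", 2), ("block_size", 4)])

def Spec_apply (text : String) (params : List (String × Int)) (out : String) : Prop := out = apply_alt text params
instance (text : String) (params : List (String × Int)) (out : String) : Decidable (Spec_apply text params out) := by unfold Spec_apply; infer_instance

-- ===== CLAIM (what is proved, stated in full; the proofs are below) =====
def Claim_equal_apply : Prop := ∀ (text : String) (params : List (String × Int)), Dom_apply text params → Pre_apply text params → Spec_apply text params (apply text params)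

-- ===== LEMMAS AND PROOFS =====

-- abbreviations used only by the proofs
def pvGet (t : List Char) (i : Int) : Char := PySem.List.pyGetD t i ' '
def pvOff (n bs a : Int) : Int := PySem.Int.mod (PySem.Int.floordiv a bs) n
def pvLen (t : List Char) (bs a : Int) : Int :=
  ((PySem.List.slice t (some a) (some (a + bs))).length : Int)
def pvLoc (n len off : Int) : List Int :=
  PySem.List.pyRange off len n ++
    (PySem.List.pyRange 0 len 1).filter (fun i => decide (PySem.Int.mod i n ≠ off))
def pvG (t : List Char) (n bs a : Int) : List Int :=
  (pvLoc n (pvLen t bs a) (pvOff n bs a)).map (fun i => a + i)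
def pvYs (t : List Char) (n bs : Int) : List Int :=
  (PySem.List.pyRange 0 (t.length : Int) bs).flatMap (pvG t n bs)

-- general pyRange facts for a positive step
lemma pyRange_pos_cons (a b s : Int) (hs : 0 < s) (h : a < b) :
    PySem.List.pyRange a b s = a :: PySem.List.pyRange (a + s) b s := by
  rw [PySem.List.pyRange_of_pos a b hs, PySem.List.pyRange_of_pos (a + s) b hs]
  have hm : (if a < b then ((b - a + s - 1) / s).toNat else 0)
      = (if a + s < b then ((b - (a + s) + s - 1) / s).toNat else 0) + 1 := by
    rw [if_pos h]
    have h1 : b - a + s - 1 = (b - a - 1) + s * 1 := by ring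
    have h2 : (b - a + s - 1) / s = (b - a - 1) / s + 1 := by
      rw [h1, Int.add_mul_ediv_left _ _ (by omega : s ≠ 0)]
    by_cases hab : a + s < b
    · rw [if_pos hab]
      have : b - (a + s) + s - 1 = b - a - 1 := by ring
      rw [this, h2]
      have : (0:Int) ≤ (b - a - 1) / s := Int.ediv_nonneg (by omega) (by omega)
      omega
    · rw [if_neg hab]
      have h0 : (b - a - 1) / s = 0 := Int.ediv_eq_zero_of_lt (by omega) (by omega)
      rw [h2, h0]
      simp
  rw [hm, List.range_succ_eq_map, List.map_cons, List.map_map]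
  rw [List.cons_eq_cons]
  refine ⟨by omega, ?_⟩
  apply List.map_congr_left
  intro k _
  simp only [Function.comp_apply, Nat.succ_eq_add_one]
  push_cast
  ring

lemma pyRange_pos_eq_nil (a b s : Int) (hs : 0 < s) (h : b ≤ a) :
    PySem.List.pyRange a b s = [] := by
  rw [PySem.List.pyRange_of_pos a b hs, if_neg (by omega)]
  simp

lemma nodup_pyRange_pos (a b s : Int) (hs : 0 < s) :
    (PySem.List.pyRange a b s).Nodup := by
  rw [PySem.List.pyRange_of_pos a b hs]
  apply List.Nodup.map
  · intro x y hxy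
    simp only at hxy
    have : (x : Int) = y := by
      have := mul_left_cancel₀ (by omega : s ≠ 0) (by omega : s * (x:Int) = s * y)
      exact this
    exact_mod_cast this
  · exact List.nodup_range

lemma pairwise_lt_pyRange_pos (a b s : Int) (hs : 0 < s) :
    (PySem.List.pyRange a b s).Pairwise (· < ·) := by
  rw [PySem.List.pyRange_of_pos a b hs]
  apply List.Pairwise.map
  · intro x y (hxy : x < y)
    have : s * (x:Int) < s * y := by
      apply mul_lt_mul_of_pos_left _ hs
      exact_mod_cast hxy
    omega
  · exact List.pairwise_lt_range

-- PySem.Int.mod is the unique representative in [0, n)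
lemma pvMod_eq_of (n x r : Int) (hn : 0 < n) (h0 : 0 ≤ r) (hr : r < n) (hd : n ∣ x - r) :
    PySem.Int.mod x n = r := by
  obtain ⟨c, hc⟩ := hd
  have hm0 := PySem.Int.mod_nonneg x hn
  have hm1 := PySem.Int.mod_lt x hn
  have hm2 := PySem.Int.floordiv_mul_add_mod x n
  set m := PySem.Int.mod x n with hm
  set q := PySem.Int.floordiv x n with hq
  -- m - r = n * (c - q)
  have hdiff : m - r = n * (c - q) := by
    have : x - r = n * c := hc
    nlinarith [hm2]
  rcases lt_trichotomy (c - q) 0 with h | h | h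
  · have : n * (c - q) ≤ -n := by nlinarith
    omega
  · rw [h, mul_zero] at hdiff
    omega
  · have : n ≤ n * (c - q) := by nlinarith
    omega

lemma pvFloordiv_nonneg (n x : Int) (hn : 0 < n) (hx : 0 ≤ x) :
    0 ≤ PySem.Int.floordiv x n := by
  rw [PySem.Int.floordiv_eq_ediv_of_pos hn]
  exact Int.ediv_nonneg hx (by omega)

-- members of the stride range have mod = off
lemma mem_stride_mod (n len off x : Int) (hn : 0 < n) (h0 : 0 ≤ off) (hoff : off < n)
    (hx : x ∈ PySem.List.pyRange off len n) : PySem.Int.mod x n = off := by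
  rw [PySem.List.mem_pyRange_iff_of_pos hn] at hx
  exact pvMod_eq_of n x off hn h0 hoff hx.2.2

-- pvLoc is a permutation of range(len)
lemma pvLoc_perm (n len off : Int) (hn : 0 < n) (h0 : 0 ≤ off) (hoff : off < n) :
    (pvLoc n len off).Perm (PySem.List.pyRange 0 len 1) := by
  have hmems : ∀ x : Int, x ∈ PySem.List.pyRange off len n → PySem.Int.mod x n = off :=
    fun x hx => mem_stride_mod n len off x hn h0 hoff hx
  rw [List.perm_ext_iff_of_nodup ?_ (PySem.List.nodup_pyRange_one 0 len)]
  · intro x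
    unfold pvLoc
    rw [List.mem_append, List.mem_filter, PySem.List.mem_pyRange_iff_of_pos hn,
        PySem.List.mem_pyRange_one]
    constructor
    · rintro (⟨hox, hxl, hdvd⟩ | ⟨⟨hx0, hxl⟩, _⟩)
      · exact ⟨by omega, hxl⟩
      · exact ⟨hx0, hxl⟩
    · rintro ⟨hx0, hxl⟩
      by_cases hcase : PySem.Int.mod x n = off
      · left
        have hfd := pvFloordiv_nonneg n x hn hx0
        have hdec := PySem.Int.floordiv_mul_add_mod x n
        rw [hcase] at hdec
        have hcomm := mul_comm (PySem.Int.floordiv x n) n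
        refine ⟨by nlinarith [hdec, hfd], hxl, ⟨PySem.Int.floordiv x n, by linarith⟩⟩
      · right
        exact ⟨⟨hx0, hxl⟩, by simp [hcase]⟩
  · unfold pvLoc
    rw [List.nodup_append]
    refine ⟨nodup_pyRange_pos off len n hn,
      (PySem.List.nodup_pyRange_one 0 len).filter _, ?_⟩
    intro x hx1 y hy
    rw [List.mem_filter] at hy
    simp only [decide_eq_true_eq] at hy
    intro hxy
    exact hy.2 (hxy ▸ hmems x hx1)

-- length of a block
lemma pvLen_eq (t : List Char) (bs a : Int) (hb : 0 < bs) (ha : 0 ≤ a) (haL : a ≤ (t.length : Int)) :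
    pvLen t bs a = min bs ((t.length : Int) - a) := by
  unfold pvLen
  rw [PySem.List.slice_toNat t ha (by omega)]
  rw [List.length_take, List.length_drop]
  omega

-- indexing into a block = indexing into the text
lemma block_get (t : List Char) (bs a i : Int) (hb : 0 < bs) (ha : 0 ≤ a)
    (hi : 0 ≤ i) (hilen : i < pvLen t bs a) :
    PySem.List.pyGetD (PySem.List.slice t (some a) (some (a + bs))) i ' ' = pvGet t (a + i) := by
  have hsl := PySem.List.slice_toNat t ha (by omega : (0:Int) ≤ a + bs)
  have hlen : (PySem.List.slice t (some a) (some (a + bs))).length =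
      min ((a + bs).toNat - a.toNat) (t.length - a.toNat) := by
    rw [hsl, List.length_take, List.length_drop]
  have hiL : i < ((PySem.List.slice t (some a) (some (a + bs))).length : Int) := hilen
  rw [PySem.List.pyGetD_eq_getElem _ _ hi hiL]
  rw [pvGet, PySem.List.pyGetD_eq_getElem t (i := a + i) _ (by omega) (by omega)]
  rw [List.getElem_of_eq hsl, List.getElem_take, List.getElem_drop]
  congr 1
  omega

-- key evaluation inside a block
lemma key_eval (n bs L a i : Int) (_hn : 0 < n) (hb : 0 < bs) (ha : 0 ≤ a)
    (hd : bs ∣ a) (hi : 0 ≤ i) (hib : i < bs) :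
    applyAltKey n bs L (a + i) =
      (2 * PySem.Int.floordiv a bs +
        (if PySem.Int.mod i n = pvOff n bs a then 0 else 1)) * L + (a + i) := by
  obtain ⟨q, rfl⟩ := hd
  have hq : 0 ≤ q := by nlinarith
  have hfd : PySem.Int.floordiv (bs * q + i) bs = q := by
    rw [PySem.Int.floordiv_eq_iff_of_pos hb]
    constructor <;> nlinarith
  have hfd0 : PySem.Int.floordiv (bs * q) bs = q := by
    rw [PySem.Int.floordiv_eq_iff_of_pos hb]
    constructor <;> nlinarith
  have hmod : PySem.Int.mod (bs * q + i) bs = i := by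
    have := PySem.Int.floordiv_mul_add_mod (bs * q + i) bs
    rw [hfd] at this
    nlinarith [this]
  unfold applyAltKey pvOff
  rw [hfd, hfd0, hmod]

-- A's fold is the map of pvYs
lemma apply_body_eq (t : List Char) (n bs : Int) (hn : 0 < n) (hb : 0 < bs) :
    (PySem.List.pyRange 0 (t.length : Int) bs).foldl
      (fun result block_idx =>
        let block := PySem.List.slice t (some block_idx) (some (block_idx + bs))
        let offset := PySem.Int.mod (PySem.Int.floordiv block_idx bs) n
        let result :=
          (PySem.List.pyRange offset (block.length : Int) n).foldl
            (fun r i => r ++ [PySem.List.pyGetD block i ' ']) result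
        (PySem.List.pyRange 0 (block.length : Int) 1).foldl
          (fun r i => if PySem.Int.mod i n ≠ offset then r ++ [PySem.List.pyGetD block i ' '] else r)
          result)
      [] = (pvYs t n bs).map (pvGet t) := by
  have step : ∀ (acc : List Char) (a : Int), a ∈ PySem.List.pyRange 0 (t.length : Int) bs →
      (fun result block_idx =>
        let block := PySem.List.slice t (some block_idx) (some (block_idx + bs))
        let offset := PySem.Int.mod (PySem.Int.floordiv block_idx bs) n
        let result :=
          (PySem.List.pyRange offset (block.length : Int) n).foldl
            (fun r i => r ++ [PySem.List.pyGetD block i ' ']) result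
        (PySem.List.pyRange 0 (block.length : Int) 1).foldl
          (fun r i => if PySem.Int.mod i n ≠ offset then r ++ [PySem.List.pyGetD block i ' '] else r)
          result) acc a = acc ++ (pvG t n bs a).map (pvGet t) := by
    intro acc a hmem
    rw [PySem.List.mem_pyRange_iff_of_pos hb] at hmem
    obtain ⟨ha0, haL, hdvd⟩ := hmem
    have hoff0 : 0 ≤ PySem.Int.mod (PySem.Int.floordiv a bs) n := PySem.Int.mod_nonneg _ hn
    dsimp only
    rw [PySem.List.foldl_append_singleton_eq_map, PySem.List.foldl_append_ite]
    rw [pvG, pvLoc, List.map_map, List.map_append, List.append_assoc]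
    congr 1
    congr 1
    · apply List.map_congr_left
      intro i hi
      rw [PySem.List.mem_pyRange_iff_of_pos hn] at hi
      exact block_get t bs a i hb ha0 (by omega) hi.2.1
    · apply List.map_congr_left
      intro i hi
      rw [List.mem_filter, PySem.List.mem_pyRange_one] at hi
      exact block_get t bs a i hb ha0 hi.1.1 hi.1.2
  have main := PySem.List.foldl_congr_mem
      (f := (fun result block_idx =>
        let block := PySem.List.slice t (some block_idx) (some (block_idx + bs))
        let offset := PySem.Int.mod (PySem.Int.floordiv block_idx bs) n
        let result :=
          (PySem.List.pyRange offset (block.length : Int) n).foldl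
            (fun r i => r ++ [PySem.List.pyGetD block i ' ']) result
        (PySem.List.pyRange 0 (block.length : Int) 1).foldl
          (fun r i => if PySem.Int.mod i n ≠ offset then r ++ [PySem.List.pyGetD block i ' '] else r)
          result))
      (g := fun (acc : List Char) (a : Int) => acc ++ (pvG t n bs a).map (pvGet t))
      (init := ([] : List Char)) (l := PySem.List.pyRange 0 (t.length : Int) bs) step
  rw [main, PySem.List.foldl_append_eq_flatMap, List.nil_append, pvYs, List.map_flatMap]

-- chunking: range(L) is the concatenation of the block ranges
lemma chunk_aux (bs : Int) (hb : 0 < bs) (b : Int) (k : Nat) :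
    ∀ (a : Int), (b - a).toNat ≤ k →
      PySem.List.pyRange a b 1 =
        (PySem.List.pyRange a b bs).flatMap
          (fun c => PySem.List.pyRange c (min (c + bs) b) 1) := by
  induction k with
  | zero =>
    intro a hk
    rw [PySem.List.pyRange_one_eq_nil (by omega), pyRange_pos_eq_nil a b bs hb (by omega)]
    simp
  | succ k ih =>
    intro a hk
    by_cases hab : a < b
    · rw [pyRange_pos_cons a b bs hb hab, List.flatMap_cons]
      rw [PySem.List.pyRange_one_append a (min (a + bs) b) b (by omega) (by omega)]
      congr 1
      by_cases h3 : a + bs < b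
      · rw [min_eq_left (by omega : a + bs ≤ b)]
        exact ih (a + bs) (by omega)
      · rw [min_eq_right (by omega : b ≤ a + bs)]
        rw [PySem.List.pyRange_one_eq_nil (le_refl b),
            pyRange_pos_eq_nil (a + bs) b bs hb (by omega)]
        simp
    · rw [PySem.List.pyRange_one_eq_nil (by omega), pyRange_pos_eq_nil a b bs hb (by omega)]
      simp

lemma chunk (bs : Int) (hb : 0 < bs) (a b : Int) :
    PySem.List.pyRange a b 1 =
      (PySem.List.pyRange a b bs).flatMap
        (fun c => PySem.List.pyRange c (min (c + bs) b) 1) :=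
  chunk_aux bs hb b (b - a).toNat a (le_refl _)

lemma pvFloordiv_mul (bs q : Int) (hb : 0 < bs) : PySem.Int.floordiv (bs * q) bs = q := by
  rw [PySem.Int.floordiv_eq_iff_of_pos hb]
  constructor <;> nlinarith

lemma shift_pyRange (c len : Int) :
    (PySem.List.pyRange 0 len 1).map (fun i => c + i) = PySem.List.pyRange c (c + len) 1 := by
  rw [PySem.List.pyRange_one 0 len, PySem.List.pyRange_one c (c + len), List.map_map]
  have : (c + len - c).toNat = (len - 0).toNat := by omega
  rw [this]
  apply List.map_congr_left
  intro k _
  simp only [Function.comp_apply]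
  ring

-- bounds for members of pvLoc
lemma mem_pvLoc_bounds (n len off x : Int) (hn : 0 < n) (h0 : 0 ≤ off) (hoff : off < n)
    (hx : x ∈ pvLoc n len off) : 0 ≤ x ∧ x < len := by
  have := (pvLoc_perm n len off hn h0 hoff).mem_iff.mp hx
  rw [PySem.List.mem_pyRange_one] at this
  exact this

lemma pvYs_perm (t : List Char) (n bs : Int) (hn : 0 < n) (hb : 0 < bs) :
    (pvYs t n bs).Perm (PySem.List.pyRange 0 (t.length : Int) 1) := by
  rw [chunk bs hb 0 (t.length : Int), pvYs]
  apply List.Perm.flatMap_left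
  intro c hc
  rw [PySem.List.mem_pyRange_iff_of_pos hb] at hc
  obtain ⟨hc0, hcL, hdvd⟩ := hc
  have hdvd' : bs ∣ c := by simpa using hdvd
  have hofflt := PySem.Int.mod_lt (PySem.Int.floordiv c bs) hn
  have hoff0 := PySem.Int.mod_nonneg (PySem.Int.floordiv c bs) hn
  have hlen := pvLen_eq t bs c hb hc0 (by omega)
  have hmin : min (c + bs) (t.length : Int) = c + pvLen t bs c := by
    rw [hlen]; omega
  rw [hmin, pvG, ← shift_pyRange c (pvLen t bs c)]
  exact (pvLoc_perm n (pvLen t bs c) (pvOff n bs c) hn hoff0 hofflt).map _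

lemma pvYs_pairwise (t : List Char) (n bs : Int) (hn : 0 < n) (hb : 0 < bs) :
    (pvYs t n bs).Pairwise
      (fun x y => applyAltKey n bs (t.length : Int) x < applyAltKey n bs (t.length : Int) y) := by
  set L := (t.length : Int) with hLdef
  have hL0 : 0 ≤ L := Int.natCast_nonneg _
  rw [pvYs, List.flatMap_def, List.pairwise_flatten]
  constructor
  · -- within one block
    intro l' hl'
    rw [List.mem_map] at hl'
    obtain ⟨c, hc, rfl⟩ := hl'
    rw [PySem.List.mem_pyRange_iff_of_pos hb] at hc
    obtain ⟨hc0, hcL, hdvdraw⟩ := hc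
    have hdvd : bs ∣ c := by simpa using hdvdraw
    have hofflt : pvOff n bs c < n := PySem.Int.mod_lt (PySem.Int.floordiv c bs) hn
    have hoff0 : 0 ≤ pvOff n bs c := PySem.Int.mod_nonneg (PySem.Int.floordiv c bs) hn
    have hlen := pvLen_eq t bs c hb hc0 (by omega)
    have hkey : ∀ i : Int, 0 ≤ i → i < pvLen t bs c →
        applyAltKey n bs L (c + i) =
          (2 * PySem.Int.floordiv c bs +
            (if PySem.Int.mod i n = pvOff n bs c then 0 else 1)) * L + (c + i) :=
      fun i h1 h2 => key_eval n bs L c i hn hb hc0 hdvd h1 (by omega)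
    rw [pvG, List.pairwise_map, pvLoc, List.pairwise_append]
    refine ⟨?_, ?_, ?_⟩
    · apply (pairwise_lt_pyRange_pos (pvOff n bs c) (pvLen t bs c) n hn).imp_of_mem
      intro i j hi hj hij
      have hig := mem_stride_mod n (pvLen t bs c) (pvOff n bs c) i hn hoff0 hofflt hi
      have hjg := mem_stride_mod n (pvLen t bs c) (pvOff n bs c) j hn hoff0 hofflt hj
      rw [PySem.List.mem_pyRange_iff_of_pos hn] at hi hj
      rw [hkey i (by omega) hi.2.1, hkey j (by omega) hj.2.1, if_pos hig, if_pos hjg]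
      omega
    · apply (((PySem.List.pairwise_lt_pyRange_one 0 (pvLen t bs c)).filter _).imp_of_mem)
      intro i j hi hj hij
      rw [List.mem_filter, PySem.List.mem_pyRange_one] at hi hj
      simp only [decide_eq_true_eq] at hi hj
      rw [hkey i (by omega) hi.1.2, hkey j (by omega) hj.1.2, if_neg hi.2, if_neg hj.2]
      omega
    · intro i hi j hj
      have hig := mem_stride_mod n (pvLen t bs c) (pvOff n bs c) i hn hoff0 hofflt hi
      rw [PySem.List.mem_pyRange_iff_of_pos hn] at hi
      rw [List.mem_filter, PySem.List.mem_pyRange_one] at hj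
      simp only [decide_eq_true_eq] at hj
      rw [hkey i (by omega) hi.2.1, hkey j (by omega) hj.1.2, if_pos hig, if_neg hj.2]
      have h1 : i < L := by omega
      have h2 : 0 ≤ j := hj.1.1
      nlinarith [h1, h2, hL0]
  · -- across blocks
    rw [List.pairwise_map]
    apply (pairwise_lt_pyRange_pos 0 L bs hb).imp_of_mem
    intro c c' hc hc' hlt x hx y hy
    rw [PySem.List.mem_pyRange_iff_of_pos hb] at hc hc'
    obtain ⟨hc0, hcL, hdvdraw⟩ := hc
    obtain ⟨hc0', hcL', hdvdraw'⟩ := hc'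
    have hdvd : bs ∣ c := by simpa using hdvdraw
    have hdvd' : bs ∣ c' := by simpa using hdvdraw'
    obtain ⟨q, hq⟩ := hdvd
    obtain ⟨q', hq'⟩ := hdvd'
    have hqlt : q < q' := by nlinarith [hlt]
    rw [pvG, List.mem_map] at hx hy
    obtain ⟨i, hi, rfl⟩ := hx
    obtain ⟨j, hj, rfl⟩ := hy
    have hofflt : pvOff n bs c < n := PySem.Int.mod_lt (PySem.Int.floordiv c bs) hn
    have hoff0 : 0 ≤ pvOff n bs c := PySem.Int.mod_nonneg (PySem.Int.floordiv c bs) hn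
    have hofflt' : pvOff n bs c' < n := PySem.Int.mod_lt (PySem.Int.floordiv c' bs) hn
    have hoff0' : 0 ≤ pvOff n bs c' := PySem.Int.mod_nonneg (PySem.Int.floordiv c' bs) hn
    have hlen := pvLen_eq t bs c hb hc0 (by omega)
    have hlen' := pvLen_eq t bs c' hb hc0' (by omega)
    have hib := mem_pvLoc_bounds n (pvLen t bs c) (pvOff n bs c) i hn hoff0 hofflt hi
    have hjb := mem_pvLoc_bounds n (pvLen t bs c') (pvOff n bs c') j hn hoff0' hofflt' hj
    rw [key_eval n bs L c i hn hb hc0 ⟨q, hq⟩ hib.1 (by omega),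
        key_eval n bs L c' j hn hb hc0' ⟨q', hq'⟩ hjb.1 (by omega)]
    have hfd : PySem.Int.floordiv c bs = q := by rw [hq]; exact pvFloordiv_mul bs q hb
    have hfd' : PySem.Int.floordiv c' bs = q' := by rw [hq']; exact pvFloordiv_mul bs q' hb
    rw [hfd, hfd']
    have h2L : 2 * q * L + 2 * L ≤ 2 * q' * L := by nlinarith [hqlt, hL0]
    have hxL : c + i < L := by omega
    have hy0 : 0 ≤ c' + j := by omega
    split_ifs <;> nlinarith [h2L, hxL, hy0, hL0]

-- ===== VERDICT (by name: the statement is the Claim_ definition above) =====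
theorem apply_spec : Claim_equal_apply := by
  intro text params _ hpre
  obtain ⟨hn, hb⟩ := hpre
  unfold Spec_apply apply apply_alt
  simp only [PySem.Str.len_eq]
  rw [apply_body_eq text.toList _ _ (by omega) (by omega)]
  rw [PySem.List.sorted_eq_of_perm_of_pairwise_lt _ _ _
        (pvYs_perm text.toList _ _ (by omega) (by omega))
        (pvYs_pairwise text.toList _ _ (by omega) (by omega))]
  rfl
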